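-- pv_equiv track=rewrite | github.com/SwathiVarkala/learn-python | 04122019_secure_container_part2.py | check_number
-- ===== SOURCE A (Python) =====
-- def check_number(n):
--     double_repeat = False
--     n_repeat = 0
--     n = str(n)
--     for n1, n2 in zip(n, n[1:]):
--         if (n1 == n2):
--             n_repeat += 1
--         else:
--             if n_repeat == 1:
--                 double_repeat = True
--             n_repeat = 0
--     if n_repeat == 1:
--         double_repeat =True
--     return double_repeat
-- ===== SOURCE B (Python) =====
-- def check_number(n):
--     s = str(n)
--     i = 0
--     while i < len(s):
--         j = i
--         while j < len(s) and s[j] == s[i]: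
--             j += 1
--         if j - i == 2:
--             return True
--         i = j
--     return False
-- ===== Notes on version B (the rewrite author's own statement) =====
-- stated objective: alternative
-- what changed: B jumps over each maximal run of equal characters with an inner index scan and returns True early when a run has length exactly 2, instead of A's pairwise zip scan with a match counter, a flag and separate end-of-string boundary handling.
import Mathlib
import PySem

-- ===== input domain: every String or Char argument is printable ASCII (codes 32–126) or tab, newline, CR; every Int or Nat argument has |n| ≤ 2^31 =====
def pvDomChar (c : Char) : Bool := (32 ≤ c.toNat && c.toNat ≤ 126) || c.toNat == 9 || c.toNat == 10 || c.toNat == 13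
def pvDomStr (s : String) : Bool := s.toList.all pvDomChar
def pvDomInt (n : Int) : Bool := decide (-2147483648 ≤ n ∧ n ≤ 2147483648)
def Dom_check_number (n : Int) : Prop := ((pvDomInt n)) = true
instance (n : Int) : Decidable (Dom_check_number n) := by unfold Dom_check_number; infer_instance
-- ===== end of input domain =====

-- B scans str(n) run by maximal run (inner scan skips a whole run, early True on a run of
-- length exactly 2) instead of A's pairwise zip scan with a match counter, flag and
-- end-of-string boundary handling; same cost, different decomposition.

-- ===== PORT A =====
-- transliteration of A: fold over zip(n, n[1:]) carrying (double_repeat, n_repeat),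
-- then the final `if n_repeat == 1` boundary check.
def check_number (n : Int) : Bool :=
  let s := PySem.Int.toChars n
  let st := (s.zip (s.drop 1)).foldl
    (fun (acc : Bool × Nat) p =>
      if p.1 == p.2 then (acc.1, acc.2 + 1)
      else (if acc.2 == 1 then true else acc.1, 0))
    (false, 0)
  if st.2 == 1 then true else st.1

-- ===== PORT B =====
-- transliteration of B's outer while loop: each step consumes one maximal run
-- (the inner `while s[j] == s[i]` scan = takeWhile/dropWhile), early-returns on length 2.
def altRuns (l : List Char) : Bool :=
  match l with
  | [] => false
  | c :: cs =>
    if (cs.takeWhile (· == c)).length + 1 == 2 then true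
    else altRuns (cs.dropWhile (· == c))
termination_by l.length
decreasing_by
  simp only [List.length_cons]
  exact Nat.lt_succ_of_le (List.length_dropWhile_le _ _)

def check_number_alt (n : Int) : Bool :=
  altRuns (PySem.Int.toChars n)

-- ===== PRECONDITION & SPEC =====
def Spec_check_number (n : Int) (out : Bool) : Prop := out = check_number_alt n
instance (n : Int) (out : Bool) : Decidable (Spec_check_number n out) := by unfold Spec_check_number; infer_instance

-- ===== CLAIM (what is proved, stated in full; the proofs are below) =====
def Claim_equal_check_number : Prop := ∀ (n : Int), Dom_check_number n → Spec_check_number n (check_number n)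

-- ===== LEMMAS AND PROOFS =====

-- Invariant of A's fold: with current-run-so-far counter r and flag d, the finished value is
-- d || (current run, extended by its remaining tail, has length exactly 2) || (some later run does).
theorem foldA_eq (cs : List Char) : ∀ (c : Char) (d : Bool) (r : Nat),
    (if (((c :: cs).zip cs).foldl
        (fun (acc : Bool × Nat) p =>
          if p.1 == p.2 then (acc.1, acc.2 + 1)
          else (if acc.2 == 1 then true else acc.1, 0)) (d, r)).2 == 1 then true
      else (((c :: cs).zip cs).foldl
        (fun (acc : Bool × Nat) p =>
          if p.1 == p.2 then (acc.1, acc.2 + 1)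
          else (if acc.2 == 1 then true else acc.1, 0)) (d, r)).1)
    = (d || (decide (r + 1 + (cs.takeWhile (· == c)).length = 2)
         || altRuns (cs.dropWhile (· == c)))) := by
  induction cs with
  | nil =>
    intro c d r
    simp [altRuns]
    by_cases h : r = 1 <;> simp [h]
  | cons c2 cs ih =>
    intro c d r
    by_cases h : c = c2
    · subst h
      simp only [List.zip_cons_cons, List.foldl_cons, beq_self_eq_true,
        List.takeWhile_cons, List.dropWhile_cons, if_true]
      rw [ih c d (r + 1)]
      simp only [List.length_cons]
      congr 2
      simp only [decide_eq_decide]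
      omega
    · have hb : (c == c2) = false := by simp [h]
      simp only [List.zip_cons_cons, List.foldl_cons, hb, Bool.false_eq_true, if_false,
        List.takeWhile_cons, List.dropWhile_cons]
      rw [ih c2 _ 0]
      have hb2 : (c2 == c) = false := by simpa using Ne.symm h
      simp only [hb2, Bool.false_eq_true, if_false, List.length_nil,
        Nat.add_zero]
      rw [show altRuns (c2 :: cs)
            = (decide ((cs.takeWhile (· == c2)).length + 1 = 2)
                || altRuns (cs.dropWhile (· == c2))) by
        rw [altRuns]
        by_cases h2 : (cs.takeWhile (· == c2)).length = 1 <;> simp [h2]]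
      have hx : (1 + (cs.takeWhile (· == c2)).length = 2) ↔ ((cs.takeWhile (· == c2)).length = 1) := by
        omega
      have hy : (r + 1 = 2) ↔ (r = 1) := by omega
      by_cases hr : r = 1 <;> by_cases hl : (cs.takeWhile (· == c2)).length = 1 <;>
        simp [hx, hy, hr, hl]

-- ===== VERDICT (by name: the statement is the Claim_ definition above) =====
theorem check_number_spec : Claim_equal_check_number := by
  unfold Claim_equal_check_number
  intro n _
  unfold Spec_check_number check_number check_number_alt
  cases hs : PySem.Int.toChars n with
  | nil => simp [altRuns]
  | cons c cs =>
    simp only [List.drop_one, List.tail_cons]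
    rw [foldA_eq cs c false 0]
    have hcomm : (0 + 1 + (cs.takeWhile (· == c)).length) = (cs.takeWhile (· == c)).length + 1 := by
      omega
    rw [hcomm, altRuns]
    by_cases h2 : (cs.takeWhile (· == c)).length = 1 <;> simp [h2]
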